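-- pv_equiv track=rewrite | github.com/HengXin666/HX-Ass-Skill | hx-ass-skill/assets/案例/大切がきこえる/generate_taisetsu.py | classify_sections
-- ===== SOURCE A (Python) =====
-- def classify_sections(lines_orig):
--     """为每行标注段落类型"""
--     sections = []
--     for line in lines_orig:
--         t = line["start_ms"]
--         # 歌手/作词/作曲 信息行 (0~1.27s)
--         if t < 1270:
--             sections.append("info")
--         # A1段 (1.27 ~ 51s) 安静叙事
--         elif t < 51000:
--             sections.append("verse_A")
--         # 副歌1 (51 ~ 86s)
--         elif t < 86000:
--             sections.append("chorus_1")
--         # 间奏 + A2段 (86 ~ 135s)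
--         elif t < 135000:
--             # 间奏过后有 キラキラ (29.86s) 然后进入A2
--             if t < 96000:
--                 sections.append("interlude")
--             else:
--                 sections.append("verse_B")
--         # B段过渡 (135 ~ 162s)
--         elif t < 162000:
--             sections.append("bridge")
--         # 副歌2 + 间奏2 (162 ~ 222s)
--         elif t < 222000:
--             sections.append("chorus_2")
--         # C段 (222 ~ 260s)
--         elif t < 260000:
--             sections.append("verse_C")
--         # 终章副歌 (260 ~ 末尾)
--         else:
--             sections.append("final_chorus")
--
--     return sections
-- ===== SOURCE B (Python) =====
-- _BOUNDS = [1270, 51000, 86000, 96000, 135000, 162000, 222000, 260000]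
-- _LABELS = ["info", "verse_A", "chorus_1", "interlude", "verse_B",
--            "bridge", "chorus_2", "verse_C", "final_chorus"]
--
--
-- def _bisect_right(a, x):
--     """Index of the first element of sorted list a that is > x."""
--     lo, hi = 0, len(a)
--     while lo < hi:
--         mid = (lo + hi) // 2
--         if x < a[mid]:
--             hi = mid
--         else:
--             lo = mid + 1
--     return lo
--
--
-- def classify_sections(lines_orig):
--     """为每行标注段落类型"""
--     return [_LABELS[_bisect_right(_BOUNDS, line["start_ms"])]
--             for line in lines_orig]
-- ===== Notes on version B (the rewrite author's own statement) =====
-- stated objective: simpler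
-- what changed: Replaces the nested if/elif chain with a sorted boundary table plus labels and a hand-written binary search (bisect_right) per line.
import Mathlib
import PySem

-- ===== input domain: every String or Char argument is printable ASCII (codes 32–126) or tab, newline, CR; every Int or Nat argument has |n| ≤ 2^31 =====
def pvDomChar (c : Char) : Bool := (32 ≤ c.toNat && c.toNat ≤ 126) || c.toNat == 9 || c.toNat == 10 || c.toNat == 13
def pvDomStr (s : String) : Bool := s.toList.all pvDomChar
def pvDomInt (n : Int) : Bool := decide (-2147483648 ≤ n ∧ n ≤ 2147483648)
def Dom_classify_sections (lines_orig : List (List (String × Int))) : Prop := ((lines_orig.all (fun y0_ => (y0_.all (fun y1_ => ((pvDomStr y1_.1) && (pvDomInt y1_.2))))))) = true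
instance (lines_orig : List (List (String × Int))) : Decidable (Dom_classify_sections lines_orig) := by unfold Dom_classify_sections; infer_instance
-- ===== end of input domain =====

-- B replaces A's nested if/elif chain by a sorted boundary/label table searched with a
-- hand-written bisect_right binary search (objective: simpler).

-- ===== PORT A =====
-- A's if/elif chain on t = line["start_ms"] (a line without that key raises KeyError; excluded by Pre_).
def pvLabelA (t : Int) : String :=
  if t < 1270 then "info"
  else if t < 51000 then "verse_A"
  else if t < 86000 then "chorus_1"
  else if t < 135000 then
    (if t < 96000 then "interlude" else "verse_B")
  else if t < 162000 then "bridge"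
  else if t < 222000 then "chorus_2"
  else if t < 260000 then "verse_C"
  else "final_chorus"

def classify_sections (lines_orig : List (List (String × Int))) : List String :=
  lines_orig.foldl
    (fun sections line =>
      sections ++ [pvLabelA (PySem.Dict.getD (PySem.Dict.ofList line) "start_ms" 0)])
    []

-- ===== PORT B =====
def pvBounds : List Int := [1270, 51000, 86000, 96000, 135000, 162000, 222000, 260000]
def pvLabels : List String :=
  ["info", "verse_A", "chorus_1", "interlude", "verse_B",
   "bridge", "chorus_2", "verse_C", "final_chorus"]

-- Source B's hand-written _bisect_right while-loop; fuel (≥ loop's iteration count) only makes it total.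
def pvBisectGo (a : List Int) (x : Int) : Nat → Nat → Nat → Nat
  | 0, lo, _ => lo
  | fuel + 1, lo, hi =>
    if lo < hi then
      let mid := (lo + hi) / 2
      if x < a.getD mid 0 then pvBisectGo a x fuel lo mid
      else pvBisectGo a x fuel (mid + 1) hi
    else lo

def pvBisectRight (a : List Int) (x : Int) (lo hi : Nat) : Nat :=
  pvBisectGo a x (a.length + 1) lo hi

def classify_sections_alt (lines_orig : List (List (String × Int))) : List String :=
  lines_orig.map
    (fun line =>
      pvLabels.getD
        (pvBisectRight pvBounds (PySem.Dict.getD (PySem.Dict.ofList line) "start_ms" 0) 0 pvBounds.length)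
        "")

-- ===== PRECONDITION & SPEC =====
-- Pre_ excludes exactly the lines without a "start_ms" key, where Python A raises KeyError (B does too).
def Pre_classify_sections (lines_orig : List (List (String × Int))) : Prop :=
  ∀ line ∈ lines_orig, (PySem.Dict.get? (PySem.Dict.ofList line) "start_ms").isSome = true
instance (lines_orig : List (List (String × Int))) : Decidable (Pre_classify_sections lines_orig) := by unfold Pre_classify_sections; infer_instance

def pvWitness_classify_sections : (List (List (String × Int))) :=
  [[("start_ms", 0)], [("start_ms", 100000)], [("start_ms", 300000)]]

def Spec_classify_sections (lines_orig : List (List (String × Int))) (out : List String) : Prop := out = classify_sections_alt lines_orig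
instance (lines_orig : List (List (String × Int))) (out : List String) : Decidable (Spec_classify_sections lines_orig out) := by unfold Spec_classify_sections; infer_instance

-- ===== CLAIM (what is proved, stated in full; the proofs are below) =====
def Claim_equal_classify_sections : Prop := ∀ (lines_orig : List (List (String × Int))), Dom_classify_sections lines_orig → Pre_classify_sections lines_orig → Spec_classify_sections lines_orig (classify_sections lines_orig)

-- ===== LEMMAS AND PROOFS =====

-- Evaluation of the binary search on the concrete table, one interval at a time.
theorem pvB0 (t : Int) (h : t < 1270) : pvBisectRight pvBounds t 0 8 = 0 := by
  simp [pvBisectRight, pvBisectGo, pvBounds, h, show t < 135000 by omega, show t < 86000 by omega,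
        show t < 51000 by omega]
theorem pvB1 (t : Int) (h0 : 1270 ≤ t) (h : t < 51000) : pvBisectRight pvBounds t 0 8 = 1 := by
  simp [pvBisectRight, pvBisectGo, pvBounds, h, show t < 135000 by omega, show t < 86000 by omega,
        show ¬ t < 1270 by omega]
theorem pvB2 (t : Int) (h0 : 51000 ≤ t) (h : t < 86000) : pvBisectRight pvBounds t 0 8 = 2 := by
  simp [pvBisectRight, pvBisectGo, pvBounds, h, show t < 135000 by omega, show ¬ t < 51000 by omega]
theorem pvB3 (t : Int) (h0 : 86000 ≤ t) (h : t < 96000) : pvBisectRight pvBounds t 0 8 = 3 := by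
  simp [pvBisectRight, pvBisectGo, pvBounds, h, show t < 135000 by omega, show ¬ t < 86000 by omega]
theorem pvB4 (t : Int) (h0 : 96000 ≤ t) (h : t < 135000) : pvBisectRight pvBounds t 0 8 = 4 := by
  simp [pvBisectRight, pvBisectGo, pvBounds, h, show ¬ t < 86000 by omega, show ¬ t < 96000 by omega]
theorem pvB5 (t : Int) (h0 : 135000 ≤ t) (h : t < 162000) : pvBisectRight pvBounds t 0 8 = 5 := by
  simp [pvBisectRight, pvBisectGo, pvBounds, h, show ¬ t < 135000 by omega, show t < 222000 by omega]
theorem pvB6 (t : Int) (h0 : 162000 ≤ t) (h : t < 222000) : pvBisectRight pvBounds t 0 8 = 6 := by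
  simp [pvBisectRight, pvBisectGo, pvBounds, h, show ¬ t < 135000 by omega, show ¬ t < 162000 by omega]
theorem pvB7 (t : Int) (h0 : 222000 ≤ t) (h : t < 260000) : pvBisectRight pvBounds t 0 8 = 7 := by
  simp [pvBisectRight, pvBisectGo, pvBounds, h, show ¬ t < 135000 by omega, show ¬ t < 222000 by omega]
theorem pvB8 (t : Int) (h0 : 260000 ≤ t) : pvBisectRight pvBounds t 0 8 = 8 := by
  simp [pvBisectRight, pvBisectGo, pvBounds, show ¬ t < 135000 by omega, show ¬ t < 222000 by omega,
        show ¬ t < 260000 by omega]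

-- Per element, B's table lookup equals A's if-chain.
theorem pvLabel_eq (t : Int) :
    pvLabelA t = pvLabels.getD (pvBisectRight pvBounds t 0 pvBounds.length) "" := by
  have hl : pvBounds.length = 8 := rfl
  rw [hl]
  by_cases h0 : t < 1270
  · rw [pvB0 t h0]; simp [pvLabelA, pvLabels, h0]
  by_cases h1 : t < 51000
  · rw [pvB1 t (by omega) h1]; simp [pvLabelA, pvLabels, h0, h1]
  by_cases h2 : t < 86000
  · rw [pvB2 t (by omega) h2]; simp [pvLabelA, pvLabels, h0, h1, h2]
  by_cases h3 : t < 96000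
  · rw [pvB3 t (by omega) h3]; simp [pvLabelA, pvLabels, h0, h1, h2, h3, show t < 135000 by omega]
  by_cases h4 : t < 135000
  · rw [pvB4 t (by omega) h4]; simp [pvLabelA, pvLabels, h0, h1, h2, h3, h4]
  by_cases h5 : t < 162000
  · rw [pvB5 t (by omega) h5]; simp [pvLabelA, pvLabels, h0, h1, h2, h4, h5]
  by_cases h6 : t < 222000
  · rw [pvB6 t (by omega) h6]; simp [pvLabelA, pvLabels, h0, h1, h2, h4, h5, h6]
  by_cases h7 : t < 260000
  · rw [pvB7 t (by omega) h7]; simp [pvLabelA, pvLabels, h0, h1, h2, h4, h5, h6, h7]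
  · rw [pvB8 t (by omega)]; simp [pvLabelA, pvLabels, h0, h1, h2, h4, h5, h6, h7]

-- ===== VERDICT (by name: the statement is the Claim_ definition above) =====
theorem classify_sections_spec : Claim_equal_classify_sections := by
  intro lines _ _
  unfold Spec_classify_sections classify_sections classify_sections_alt
  rw [PySem.List.foldl_append_singleton_eq_map]
  simp only [List.nil_append]
  exact List.map_congr_left (fun line _ => pvLabel_eq _)
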